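-- pv_equiv track=rewrite | github.com/gaurav-3dlogic/Nearest_upper_and_lower_in_dict | Nearest_upper_and_lower_in_dict.py | find_nearest_values
-- ===== SOURCE A (Python) =====
-- def find_nearest_values(dictionary, n):
--     keys = sorted(dictionary.keys())
--
--     lower = None
--     upper = None
--
--     for key in keys:
--         if key <= n:
--             lower = key
--         else:
--             upper = key
--             break
--
--     return lower, upper
-- ===== SOURCE B (Python) =====
-- def find_nearest_values(dictionary, n):
--     lower = max((k for k in dictionary if k <= n), default=None)
--     upper = min((k for k in dictionary if k > n), default=None)
--     return lower, upper
-- ===== Notes on version B (the rewrite author's own statement) =====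
-- stated objective: simpler
-- what changed: Replaces A's sort-then-boundary-scan with two independent filtered extremum passes: lower = max of keys <= n, upper = min of keys > n, no sorting.
import Mathlib
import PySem

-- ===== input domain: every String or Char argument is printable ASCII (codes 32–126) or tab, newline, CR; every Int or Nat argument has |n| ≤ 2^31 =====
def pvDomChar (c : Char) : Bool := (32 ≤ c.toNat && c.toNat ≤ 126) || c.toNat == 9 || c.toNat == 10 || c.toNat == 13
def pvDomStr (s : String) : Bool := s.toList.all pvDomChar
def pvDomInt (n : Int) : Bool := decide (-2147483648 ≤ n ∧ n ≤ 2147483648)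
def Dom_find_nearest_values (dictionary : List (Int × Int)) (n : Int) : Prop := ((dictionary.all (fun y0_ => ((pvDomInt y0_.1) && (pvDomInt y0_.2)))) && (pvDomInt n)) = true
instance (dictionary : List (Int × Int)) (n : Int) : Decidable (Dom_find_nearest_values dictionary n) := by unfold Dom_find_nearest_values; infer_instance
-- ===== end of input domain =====

-- B replaces A's sort-then-boundary-scan with two filtered extremum passes (max of keys ≤ n, min of keys > n); objective: simpler.

-- ===== PORT A =====
-- the for-loop over the sorted keys, with 'break' on the first key > n
def pvLoopA (n : Int) : List Int → Option Int → Option Int × Option Int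
  | [], lower => (lower, none)
  | k :: rest, lower => if k ≤ n then pvLoopA n rest (some k) else (lower, some k)

def find_nearest_values (dictionary : List (Int × Int)) (n : Int) : Option Int × Option Int :=
  let keys := PySem.List.sorted (PySem.Dict.ofList dictionary).keys (fun x => x) false
  pvLoopA n keys none

-- ===== PORT B =====
def find_nearest_values_alt (dictionary : List (Int × Int)) (n : Int) : Option Int × Option Int :=
  let keys := (PySem.Dict.ofList dictionary).keys
  (PySem.List.max? (keys.filter (fun k => decide (k ≤ n))) (fun x => x),
   PySem.List.min? (keys.filter (fun k => decide (n < k))) (fun x => x))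

-- ===== PRECONDITION & SPEC =====
def Spec_find_nearest_values (dictionary : List (Int × Int)) (n : Int) (out : Option Int × Option Int) : Prop := out = find_nearest_values_alt dictionary n
instance (dictionary : List (Int × Int)) (n : Int) (out : Option Int × Option Int) : Decidable (Spec_find_nearest_values dictionary n out) := by unfold Spec_find_nearest_values; infer_instance

-- ===== CLAIM (what is proved, stated in full; the proofs are below) =====
def Claim_equal_find_nearest_values : Prop := ∀ (dictionary : List (Int × Int)) (n : Int), Dom_find_nearest_values dictionary n → Spec_find_nearest_values dictionary n (find_nearest_values dictionary n)

-- ===== LEMMAS AND PROOFS =====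

-- a value that is in l and bounds l above is THE value max? returns (and dually for min?)
lemma pv_max_char (l : List Int) (v : Int) (hv : v ∈ l) (hmax : ∀ y ∈ l, y ≤ v) :
    PySem.List.max? l (fun x => x) = some v := by
  cases h : PySem.List.max? l (fun x => x) with
  | none => exact absurd ((PySem.List.max?_eq_none_iff l (fun x => x)).1 h ▸ hv) (List.not_mem_nil)
  | some m =>
    have hm := PySem.List.max?_mem h
    have := PySem.List.max?_isMax h
    exact congrArg some (le_antisymm (hmax m hm) (this v hv))

lemma pv_min_char (l : List Int) (v : Int) (hv : v ∈ l) (hmin : ∀ y ∈ l, v ≤ y) :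
    PySem.List.min? l (fun x => x) = some v := by
  cases h : PySem.List.min? l (fun x => x) with
  | none => exact absurd ((PySem.List.min?_eq_none_iff l (fun x => x)).1 h ▸ hv) (List.not_mem_nil)
  | some m =>
    have hm := PySem.List.min?_mem h
    have := PySem.List.min?_isMin h
    exact congrArg some (le_antisymm (this v hv) (hmin m hm))

-- max?/min? of Int with the identity key depend only on the multiset of elements
lemma pv_max?_perm (l₁ l₂ : List Int) (h : l₁.Perm l₂) :
    PySem.List.max? l₁ (fun x => x) = PySem.List.max? l₂ (fun x => x) := by
  cases h2 : PySem.List.max? l₂ (fun x => x) with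
  | none =>
    have : l₂ = [] := (PySem.List.max?_eq_none_iff l₂ (fun x => x)).1 h2
    subst this
    exact (PySem.List.max?_eq_none_iff l₁ (fun x => x)).2 h.eq_nil
  | some v =>
    exact pv_max_char _ v (h.mem_iff.2 (PySem.List.max?_mem h2))
      (fun y hy => PySem.List.max?_isMax h2 y (h.subset hy))

lemma pv_min?_perm (l₁ l₂ : List Int) (h : l₁.Perm l₂) :
    PySem.List.min? l₁ (fun x => x) = PySem.List.min? l₂ (fun x => x) := by
  cases h2 : PySem.List.min? l₂ (fun x => x) with
  | none =>
    have : l₂ = [] := (PySem.List.min?_eq_none_iff l₂ (fun x => x)).1 h2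
    subst this
    exact (PySem.List.min?_eq_none_iff l₁ (fun x => x)).2 h.eq_nil
  | some v =>
    exact pv_min_char _ v (h.mem_iff.2 (PySem.List.min?_mem h2))
      (fun y hy => PySem.List.min?_isMin h2 y (h.subset hy))

-- folding 'lower = key' over a list keeps the last element (or the accumulator if none)
lemma pv_foldl_some (xs : List Int) (acc : Option Int) :
    xs.foldl (fun _ k => some k) acc = xs.getLast?.or acc := by
  induction xs generalizing acc with
  | nil => rfl
  | cons x t ih =>
    cases t with
    | nil => rfl
    | cons y s => simpa [List.foldl] using ih (acc := some x)

-- on a weakly increasing list every element is at most the last one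
lemma pv_le_getLast : ∀ (l : List Int) (_ : l.Pairwise (· ≤ ·)) (h : l ≠ []) (y : Int), y ∈ l → y ≤ l.getLast h
  | x :: t, hp, _, y, hy => by
    rw [List.pairwise_cons] at hp
    cases t with
    | nil => simp_all
    | cons z s =>
      rw [List.getLast_cons (List.cons_ne_nil z s)]
      rcases List.mem_cons.1 hy with rfl | hy
      · exact le_trans (hp.1 _ (List.getLast_mem _)) (le_refl _)
      · exact pv_le_getLast (z :: s) hp.2 (List.cons_ne_nil z s) y hy

-- on a weakly increasing list, max? is the last element and min? is the first
lemma pv_max?_of_pairwise (l : List Int) (hp : l.Pairwise (· ≤ ·)) :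
    PySem.List.max? l (fun x => x) = l.getLast? := by
  cases l with
  | nil => exact (PySem.List.max?_eq_none_iff [] (fun x => x)).2 rfl
  | cons x t =>
    rw [List.getLast?_eq_some_getLast (List.cons_ne_nil x t)]
    refine pv_max_char _ _ (List.getLast_mem _) ?_
    intro y hy
    exact pv_le_getLast _ hp (List.cons_ne_nil x t) y hy

lemma pv_min?_of_pairwise (l : List Int) (hp : l.Pairwise (· ≤ ·)) :
    PySem.List.min? l (fun x => x) = l.head? := by
  cases l with
  | nil => exact (PySem.List.min?_eq_none_iff [] (fun x => x)).2 rfl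
  | cons x t =>
    rw [List.pairwise_cons] at hp
    exact pv_min_char _ x (List.mem_cons_self) (by
      intro y hy
      rcases List.mem_cons.1 hy with rfl | hy
      · exact le_refl _
      · exact hp.1 y hy)

-- the loop of A, on a weakly increasing list, computes (last key ≤ n, first key > n)
lemma pv_loopA_eq (n : Int) (l : List Int) (acc : Option Int) (hp : l.Pairwise (· ≤ ·)) :
    pvLoopA n l acc = ((l.filter (fun k => decide (k ≤ n))).foldl (fun _ k => some k) acc,
                       (l.filter (fun k => decide (n < k))).head?) := by
  induction l generalizing acc with
  | nil => rfl
  | cons k rest ih =>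
    rw [List.pairwise_cons] at hp
    by_cases hk : k ≤ n
    · have hnk : ¬ n < k := not_lt.2 hk
      simp only [pvLoopA, List.filter_cons, hk, hnk, decide_true, decide_false,
        ite_true, List.foldl_cons]
      exact ih (acc := some k) hp.2
    · have hnk : n < k := lt_of_not_ge hk
      have hrest : rest.filter (fun k => decide (k ≤ n)) = [] := by
        rw [List.filter_eq_nil_iff]
        intro y hy
        simpa using not_le.2 (lt_of_lt_of_le hnk (hp.1 y hy))
      simp [pvLoopA, hk, hnk, hrest]

-- ===== VERDICT (by name: the statement is the Claim_ definition above) =====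
theorem find_nearest_values_spec : Claim_equal_find_nearest_values := by
  intro dictionary n _
  unfold Spec_find_nearest_values find_nearest_values find_nearest_values_alt
  set keys := (PySem.Dict.ofList dictionary).keys with hkeys
  set ks := PySem.List.sorted keys (fun x => x) false with hks
  have hperm : ks.Perm keys := PySem.List.sorted_perm keys (fun x => x) false
  have hpair : ks.Pairwise (· ≤ ·) := by
    simpa using PySem.List.sorted_pairwise keys (fun x => x)
  rw [pv_loopA_eq n ks none hpair]
  dsimp only
  rw [pv_foldl_some, Option.or_none,
    ← pv_max?_of_pairwise _ (hpair.filter _),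
    pv_max?_perm _ _ (hperm.filter _),
    ← pv_min?_of_pairwise _ (hpair.filter _),
    pv_min?_perm _ _ (hperm.filter _)]
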